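-- pv_equiv track=rewrite | github.com/coder-alpha/FMoviesPlus.bundle | Contents/Libraries/Shared/resources/lib/libraries/cleantitle.py | onlytitle
-- ===== SOURCE A (Python) =====
-- def onlytitle(title):
-- 	if title == None: return
-- 	if ' ' in title:
-- 		xtitle = title.split(' ')
-- 		ntitle = ''
-- 		for i in range(0, len(xtitle)-1):
-- 			ntitle += xtitle[i] + ' '
-- 		title = ntitle
--
-- 	return title
-- ===== SOURCE B (Python) =====
-- def onlytitle(title):
--     if title == None: return
--     if ' ' in title:
--         idx = title.rfind(' ')
--         title = title[:idx + 1]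
--     return title
-- ===== Notes on version B (the rewrite author's own statement) =====
-- stated objective: idiomatic
-- what changed: Replaces split-into-words plus an index loop rejoining all but the last word with a single rfind of the last space and one slice up to and including it.
import Mathlib
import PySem

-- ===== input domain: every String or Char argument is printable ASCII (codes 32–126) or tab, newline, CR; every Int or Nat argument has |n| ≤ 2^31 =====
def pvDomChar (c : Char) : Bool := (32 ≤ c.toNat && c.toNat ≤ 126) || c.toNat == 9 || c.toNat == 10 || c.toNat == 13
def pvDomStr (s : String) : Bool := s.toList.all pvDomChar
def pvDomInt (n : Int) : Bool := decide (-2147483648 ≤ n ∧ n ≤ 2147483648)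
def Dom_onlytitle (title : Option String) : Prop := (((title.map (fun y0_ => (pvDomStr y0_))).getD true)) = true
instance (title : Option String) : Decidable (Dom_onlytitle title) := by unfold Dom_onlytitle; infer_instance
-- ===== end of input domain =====

-- B replaces A's split-into-words-and-rejoin loop with one rfind of the last space and a slice; idiomatic, same behaviour.

-- ===== PORT A =====
-- A's str operations are ported on the code-point lists (PySem.Chars); '+=' on str is '++' on List Char.
def onlytitle (title : Option String) : Option String :=
  match title with
  | none => none
  | some t =>
    let cs := t.toList
    if PySem.Chars.isIn [' '] cs then
      let xtitle := PySem.Chars.splitOn cs [' ']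
      let ntitle := (PySem.List.pyRange 0 ((xtitle.length : Int) - 1) 1).foldl
        (fun acc i => acc ++ PySem.List.pyGetD xtitle i [] ++ [' ']) ([] : List Char)
      some (String.ofList ntitle)
    else some t

-- ===== PORT B =====
def onlytitle_alt (title : Option String) : Option String :=
  match title with
  | none => none
  | some t =>
    let cs := t.toList
    if PySem.Chars.isIn [' '] cs then
      let idx := PySem.Chars.rfind cs [' ']
      some (String.ofList (PySem.Chars.slice cs none (some (idx + 1))))
    else some t

-- ===== PRECONDITION & SPEC =====
def Spec_onlytitle (title : Option String) (out : Option String) : Prop := out = onlytitle_alt title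
instance (title : Option String) (out : Option String) : Decidable (Spec_onlytitle title out) := by unfold Spec_onlytitle; infer_instance

-- ===== CLAIM (what is proved, stated in full; the proofs are below) =====
def Claim_equal_onlytitle : Prop := ∀ (title : Option String), Dom_onlytitle title → Spec_onlytitle title (onlytitle title)

-- ===== LEMMAS AND PROOFS =====

-- reference (non-accumulator) form of Python's str.split(' ') on code points
def prependHead (p : List Char) : List (List Char) → List (List Char)
  | [] => [p]
  | x :: xs => (p ++ x) :: xs

def mySplit : List Char → List (List Char)
  | [] => [[]]
  | c :: rest => if c = ' ' then [] :: mySplit rest else prependHead [c] (mySplit rest)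

-- index of the last space, if any
def lastSpace : List Char → Option Nat
  | [] => none
  | c :: rest =>
    match lastSpace rest with
    | some k => some (k + 1)
    | none => if c = ' ' then some 0 else none

theorem mySplit_ne_nil (cs : List Char) : mySplit cs ≠ [] := by
  cases cs with
  | nil => simp [mySplit]
  | cons c rest =>
    simp only [mySplit]
    split
    · simp
    · cases h : mySplit rest <;> simp [prependHead]

theorem prependHead_nil_of_ne (m : List (List Char)) (h : m ≠ []) : prependHead [] m = m := by
  cases m with
  | nil => exact absurd rfl h
  | cons x xs => simp [prependHead]

theorem prependHead_prependHead (p q : List Char) (m : List (List Char)) :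
    prependHead p (prependHead q m) = prependHead (p ++ q) m := by
  cases m <;> simp [prependHead]

theorem mySplit_of_not_mem (cs : List Char) (h : ' ' ∉ cs) : mySplit cs = [cs] := by
  induction cs with
  | nil => rfl
  | cons c rest ih =>
    simp only [List.mem_cons, not_or] at h
    simp [mySplit, Ne.symm h.1, ih h.2, prependHead]

theorem two_le_length_mySplit (cs : List Char) (h : ' ' ∈ cs) : 2 ≤ (mySplit cs).length := by
  induction cs with
  | nil => simp at h
  | cons c rest ih =>
    simp only [mySplit]
    by_cases hc : c = ' '
    · simp only [if_pos hc, List.length_cons]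
      have := mySplit_ne_nil rest
      have : 1 ≤ (mySplit rest).length := by
        cases hm : mySplit rest with
        | nil => exact absurd hm this
        | cons a b => simp
      omega
    · have hr : ' ' ∈ rest := by
        rcases List.mem_cons.mp h with h1 | h1
        · exact absurd h1.symm hc
        · exact h1
      have := ih hr
      simp only [if_neg hc]
      cases hm : mySplit rest with
      | nil => exact absurd hm (mySplit_ne_nil rest)
      | cons a b => rw [hm] at this; simpa [prependHead] using this

theorem lastSpace_eq_none_iff (cs : List Char) : lastSpace cs = none ↔ ' ' ∉ cs := by
  induction cs with
  | nil => simp [lastSpace]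
  | cons c rest ih =>
    simp only [lastSpace, List.mem_cons, not_or]
    cases h : lastSpace rest with
    | some k => simp [← ih, h]
    | none =>
      by_cases hc : c = ' '
      · simp [hc]
      · simp [hc, Ne.symm hc, ← ih, h]

theorem lastSpace_append (l l' : List Char) :
    lastSpace (l ++ l') =
      match lastSpace l' with
      | some k => some (l.length + k)
      | none => lastSpace l := by
  induction l with
  | nil => cases h : lastSpace l' <;> simp [h, lastSpace]
  | cons c rest ih =>
    simp only [List.cons_append, lastSpace, ih]
    cases h : lastSpace l' with
    | some k =>
      cases h2 : lastSpace rest <;> simp [Nat.add_comm, Nat.add_assoc]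
    | none => rfl

theorem splitOn_go_eq (fuel : Nat) :
    ∀ (l cur : List Char) (acc : List (List Char)), l.length < fuel →
      PySem.Chars.splitOn.go [' '] fuel l cur acc =
        acc.reverse ++ prependHead cur.reverse (mySplit l) := by
  induction fuel with
  | zero => intro l cur acc h; omega
  | succ f ih =>
    intro l cur acc h
    cases l with
    | nil =>
      simp [PySem.Chars.splitOn.go, mySplit, prependHead]
    | cons c rest =>
      rw [PySem.Chars.splitOn.go]
      by_cases hc : c = ' '
      · have hpre : List.isPrefixOf [' '] (c :: rest) = true := by
          simp [List.isPrefixOf, hc]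
        rw [if_pos hpre]
        simp only [List.length_singleton, List.drop_one, List.tail_cons]
        rw [ih rest [] (cur.reverse :: acc) (by simp at h ⊢; omega)]
        simp only [List.reverse_nil]
        rw [prependHead_nil_of_ne _ (mySplit_ne_nil rest)]
        simp [mySplit, hc, prependHead]
      · have hpre : List.isPrefixOf [' '] (c :: rest) = false := by
          simp [List.isPrefixOf]
          exact fun hh => hc hh.symm
        rw [if_neg (by simp [hpre])]
        rw [ih rest (c :: cur) acc (by simp at h ⊢; omega)]
        simp [mySplit, hc, prependHead_prependHead]

theorem splitOn_eq_mySplit (cs : List Char) :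
    PySem.Chars.splitOn cs [' '] = mySplit cs := by
  unfold PySem.Chars.splitOn
  rw [splitOn_go_eq (cs.length + 1) cs [] [] (by omega)]
  simp [prependHead_nil_of_ne _ (mySplit_ne_nil cs)]

theorem isPrefixOf_space_iff (l : List Char) :
    List.isPrefixOf [' '] l = true ↔ ∃ t, l = ' ' :: t := by
  cases l with
  | nil => simp [List.isPrefixOf]
  | cons c rest =>
    simp only [List.isPrefixOf, Bool.and_true, beq_iff_eq]
    constructor
    · intro h; exact ⟨rest, by rw [h]⟩
    · rintro ⟨t, ht⟩; cases ht; rfl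

theorem rfind_go_spec (s : List Char) (j : Nat) :
    PySem.Chars.rfind.go s [' '] j =
      match lastSpace (s.take (j + 1)) with
      | some k => (k : Int)
      | none => -1 := by
  induction j with
  | zero =>
    rw [PySem.Chars.rfind.go]
    cases s with
    | nil => simp [lastSpace]
    | cons c rest =>
      by_cases hc : c = ' '
      · rw [if_pos ((isPrefixOf_space_iff _).mpr ⟨rest, by rw [hc]⟩)]
        simp [lastSpace, hc]
      · have : List.isPrefixOf [' '] (c :: rest) = false := by
          rcases h : List.isPrefixOf [' '] (c :: rest) with _ | _
          · rfl
          · rcases (isPrefixOf_space_iff _).mp h with ⟨t, ht⟩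
            cases ht; exact absurd rfl hc
        rw [if_neg (by simp [this])]
        simp [List.take_add_one, lastSpace, hc]
  | succ j ih =>
    rw [PySem.Chars.rfind.go]
    have htake : s.take (j + 2) = s.take (j + 1) ++ (s[j+1]?).toList := by
      simpa using List.take_add_one (l := s) (i := j + 1)
    rw [htake, lastSpace_append]
    cases hg : s[j+1]? with
    | none =>
      have hd : s.drop (j + 1) = [] := by
        have := List.getElem?_eq_none_iff.mp hg
        exact List.drop_eq_nil_of_le this
      rw [hd]
      rw [if_neg (by simp [List.isPrefixOf])]
      simpa [lastSpace] using ih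
    | some c =>
      have hlen : j + 1 < s.length := by
        by_contra hh
        rw [List.getElem?_eq_none_iff.mpr (by omega)] at hg; cases hg
      have hd : s.drop (j + 1) = c :: s.drop (j + 2) := by
        rw [List.drop_eq_getElem_cons hlen]
        simp [List.getElem?_eq_getElem hlen] at hg
        rw [hg]
      by_cases hc : c = ' '
      · rw [if_pos (by rw [hd]; exact (isPrefixOf_space_iff _).mpr ⟨_, by rw [hc]⟩)]
        simp [hc, lastSpace, List.length_take, Nat.min_eq_left (by omega : j + 1 ≤ s.length)]
      · have : List.isPrefixOf [' '] (s.drop (j+1)) = false := by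
          rcases h : List.isPrefixOf [' '] (s.drop (j+1)) with _ | _
          · rfl
          · rcases (isPrefixOf_space_iff _).mp h with ⟨t, ht⟩
            rw [hd] at ht; cases ht; exact absurd rfl hc
        rw [if_neg (by simp [this])]
        simpa [lastSpace, hc] using ih

theorem rfind_eq_lastSpace (s : List Char) (k : Nat) (h : lastSpace s = some k) :
    PySem.Chars.rfind s [' '] = (k : Int) := by
  unfold PySem.Chars.rfind
  rw [rfind_go_spec]
  have : s.take (s.length + 1) = s := List.take_of_length_le (by omega)
  rw [this, h]

theorem flatMap_dropLast_mySplit (cs : List Char) (k : Nat) (h : lastSpace cs = some k) :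
    (mySplit cs).dropLast.flatMap (fun p => p ++ [' ']) = cs.take (k + 1) := by
  induction cs generalizing k with
  | nil => simp [lastSpace] at h
  | cons c rest ih =>
    simp only [lastSpace] at h
    cases hr : lastSpace rest with
    | none =>
      rw [hr] at h
      have hnm : ' ' ∉ rest := (lastSpace_eq_none_iff rest).mp hr
      by_cases hc : c = ' '
      · rw [if_pos hc] at h
        injection h with hk
        rw [mySplit, if_pos hc, mySplit_of_not_mem rest hnm]
        simp [← hk, hc]
      · rw [if_neg hc] at h; cases h
    | some k' =>
      rw [hr] at h
      injection h with hk
      have hmem : ' ' ∈ rest := by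
        by_contra hnm
        rw [(lastSpace_eq_none_iff rest).mpr hnm] at hr; cases hr
      have h2 : 2 ≤ (mySplit rest).length := two_le_length_mySplit rest hmem
      have ihr := ih k' hr
      by_cases hc : c = ' '
      · rw [mySplit, if_pos hc]
        rw [List.dropLast_cons_of_ne_nil (mySplit_ne_nil rest)]
        simp only [List.flatMap_cons, List.nil_append]
        rw [ihr, ← hk, hc]
        simp [List.take_succ_cons]
      · rw [mySplit, if_neg hc]
        cases hm : mySplit rest with
        | nil => exact absurd hm (mySplit_ne_nil rest)
        | cons hd tl =>
          have htl : tl ≠ [] := by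
            rw [hm] at h2; simp at h2
            intro hh; rw [hh] at h2; simp at h2
          rw [hm] at ihr
          rw [List.dropLast_cons_of_ne_nil htl] at ihr
          simp only [prependHead]
          rw [List.dropLast_cons_of_ne_nil htl]
          simp only [List.flatMap_cons] at ihr ⊢
          rw [← hk]
          simp only [List.take_succ_cons]
          rw [← ihr]
          simp

theorem foldl_append_chunks (g : List Char → List Char) (xs : List (List Char)) :
    ∀ init : List Char,
      xs.foldl (fun acc x => acc ++ g x) init = init ++ xs.flatMap g := by
  induction xs with
  | nil => intro init; simp
  | cons x xs ih => intro init; simp [List.foldl_cons, ih, List.flatMap_cons]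

theorem mem_iff_singleton_infix (cs : List Char) : [' '] <:+: cs ↔ ' ' ∈ cs := by
  constructor
  · rintro ⟨s, t, h⟩
    rw [← h]; simp
  · intro h
    rcases List.append_of_mem h with ⟨s, t, ht⟩
    exact ⟨s, t, by rw [ht]; simp⟩

theorem isIn_space_iff (cs : List Char) : PySem.Chars.isIn [' '] cs = true ↔ ' ' ∈ cs := by
  rw [PySem.Chars.isIn_iff_infix]
  exact mem_iff_singleton_infix cs

-- the A-side loop computes the flatMap of all words but the last, each with a trailing space
theorem loop_eq_flatMap (parts : List (List Char)) (hne : parts ≠ []) :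
    (PySem.List.pyRange 0 ((parts.length : Int) - 1) 1).foldl
        (fun acc i => acc ++ PySem.List.pyGetD parts i [] ++ [' ']) ([] : List Char)
      = parts.dropLast.flatMap (fun p => p ++ [' ']) := by
  have hlen : (parts.length : Int) - 1 = (parts.dropLast.length : Int) := by
    have : 1 ≤ parts.length := by
      cases parts with
      | nil => exact absurd rfl hne
      | cons a b => simp
    simp [List.length_dropLast]
    omega
  rw [hlen]
  have hcong : ∀ i ∈ PySem.List.pyRange 0 ((parts.dropLast.length : Int)) 1,
      ∀ acc : List Char,
        acc ++ PySem.List.pyGetD parts i [] ++ [' ']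
          = acc ++ PySem.List.pyGetD parts.dropLast i [] ++ [' '] := by
    intro i hi acc
    rw [PySem.List.mem_pyRange_one] at hi
    have h0 : 0 ≤ i := hi.1
    have h1 : i < (parts.dropLast.length : Int) := hi.2
    have h1' : i < (parts.length : Int) := by
      have hle : parts.dropLast.length ≤ parts.length := by
        simp [List.length_dropLast]
      exact lt_of_lt_of_le h1 (by exact_mod_cast hle)
    rw [PySem.List.pyGetD_eq_getElem parts [] h0 h1',
        PySem.List.pyGetD_eq_getElem parts.dropLast [] h0 h1]
    rw [List.getElem_dropLast]
  rw [PySem.List.foldl_congr_mem (PySem.List.pyRange 0 ((parts.dropLast.length : Int)))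
        (fun acc i => acc ++ PySem.List.pyGetD parts i [] ++ [' '])
        (fun acc i => acc ++ PySem.List.pyGetD parts.dropLast i [] ++ [' '])
        [] (fun acc i hi => hcong i hi acc)]
  rw [PySem.List.foldl_pyRange_zero_pyGetD' parts.dropLast [] (fun acc p => acc ++ p ++ [' ']) []]
  simpa [List.append_assoc] using foldl_append_chunks (fun p => p ++ [' ']) parts.dropLast []

-- ===== VERDICT (by name: the statement is the Claim_ definition above) =====
theorem onlytitle_spec : Claim_equal_onlytitle := by
  intro title _
  unfold Spec_onlytitle onlytitle onlytitle_alt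
  cases title with
  | none => rfl
  | some t =>
    simp only
    by_cases hin : PySem.Chars.isIn [' '] t.toList = true
    · rw [if_pos hin, if_pos hin]
      have hmem : ' ' ∈ t.toList := (isIn_space_iff _).mp hin
      obtain ⟨k, hk⟩ : ∃ k, lastSpace t.toList = some k := by
        cases h : lastSpace t.toList with
        | none => exact absurd ((lastSpace_eq_none_iff _).mp h) (by simpa using hmem)
        | some k => exact ⟨k, rfl⟩
      rw [splitOn_eq_mySplit]
      rw [loop_eq_flatMap _ (mySplit_ne_nil _)]
      rw [flatMap_dropLast_mySplit _ k hk]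
      rw [rfind_eq_lastSpace _ k hk]
      have : (k : Int) + 1 = ((k + 1 : Nat) : Int) := by push_cast; ring
      rw [this, PySem.Chars.slice_eq_listSlice, PySem.List.slice_to_natCast]
    · rw [if_neg hin, if_neg hin]
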